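-- pv_equiv track=rewrite | github.com/NicoDeGiacomo/TDA-TP1 | PART3/dac_silos.py | split_into_quarters
-- ===== SOURCE A (Python) =====
-- def split_into_quarters(matrix):
--     """
--     Function to split a matrix into four quarters.
--
--     Parameters:
--         matrix (list of lists): The matrix represented as a list of lists.
--
--     Returns:
--         tuple: A tuple containing four quarters of the matrix.
--     """
--     size = len(matrix)
--     half_size = size // 2
--
--     quarter1 = [row[:half_size] for row in matrix[:half_size]]
--     quarter2 = [row[half_size:] for row in matrix[:half_size]]
--     quarter3 = [row[:half_size] for row in matrix[half_size:]]
--     quarter4 = [row[half_size:] for row in matrix[half_size:]]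
--
--     return quarter1, quarter2, quarter3, quarter4
-- ===== SOURCE B (Python) =====
-- def split_into_quarters(matrix):
--     """Element-level routing: no slicing; each cell is appended to left/right
--     by comparing its column index to half, and each built row pair is routed
--     to the top or bottom quarters by its row index."""
--     half = len(matrix) // 2
--     q1, q2, q3, q4 = [], [], [], []
--     for i, row in enumerate(matrix):
--         left, right = [], []
--         for j, x in enumerate(row):
--             if j < half:
--                 left.append(x)
--             else:
--                 right.append(x)
--         if i < half:
--             q1.append(left)
--             q2.append(right)
--         else:
--             q3.append(left)
--             q4.append(right)
--     return q1, q2, q3, q4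
-- ===== Notes on version B (the rewrite author's own statement) =====
-- stated objective: alternative
-- what changed: Replaces A's four slicing comprehensions by a single pass with no slice operations at all: each cell is routed element-by-element into a freshly built left/right row by its column index, and the row pair is routed to the top or bottom quarters by its row index.
import Mathlib
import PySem

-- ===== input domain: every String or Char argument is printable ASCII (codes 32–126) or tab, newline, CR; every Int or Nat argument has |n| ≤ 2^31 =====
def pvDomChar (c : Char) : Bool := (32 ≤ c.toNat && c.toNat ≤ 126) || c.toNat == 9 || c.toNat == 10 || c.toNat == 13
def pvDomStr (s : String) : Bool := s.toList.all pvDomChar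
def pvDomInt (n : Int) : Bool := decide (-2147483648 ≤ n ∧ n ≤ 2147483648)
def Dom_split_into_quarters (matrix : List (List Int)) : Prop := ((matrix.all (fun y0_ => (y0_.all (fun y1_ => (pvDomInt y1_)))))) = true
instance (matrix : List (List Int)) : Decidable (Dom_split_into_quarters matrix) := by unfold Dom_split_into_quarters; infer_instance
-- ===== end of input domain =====

-- B replaces A's four slicing comprehensions by one pass with no slicing: each cell is
-- routed element-by-element by its column index, and each row pair by its row index (alternative decomposition).


-- ===== PORT A =====
def split_into_quarters (matrix : List (List Int)) : List (List Int) × List (List Int) × List (List Int) × List (List Int) :=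
  let size : Nat := matrix.length
  let half : Nat := size / 2
  let quarter1 := (PySem.List.slice matrix none (some (half : Int))).map (fun row => PySem.List.slice row none (some (half : Int)))
  let quarter2 := (PySem.List.slice matrix none (some (half : Int))).map (fun row => PySem.List.slice row (some (half : Int)) none)
  let quarter3 := (PySem.List.slice matrix (some (half : Int)) none).map (fun row => PySem.List.slice row none (some (half : Int)))
  let quarter4 := (PySem.List.slice matrix (some (half : Int)) none).map (fun row => PySem.List.slice row (some (half : Int)) none)
  (quarter1, quarter2, quarter3, quarter4)

-- ===== PORT B =====
-- the inner 'for j, x in enumerate(row)' loop of Source B: route each cell into left/right by column index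
def sq_rowLoop (half j : Nat) (left right : List Int) : List Int → List Int × List Int
  | [] => (left, right)
  | x :: xs =>
    if j < half then sq_rowLoop half (j + 1) (left ++ [x]) right xs
    else sq_rowLoop half (j + 1) left (right ++ [x]) xs

-- the outer 'for i, row in enumerate(matrix)' loop of Source B, carrying the four accumulators
def sq_altLoop (half i : Nat) (q1 q2 q3 q4 : List (List Int)) :
    List (List Int) → List (List Int) × List (List Int) × List (List Int) × List (List Int)
  | [] => (q1, q2, q3, q4)
  | row :: rows =>
    let lr := sq_rowLoop half 0 [] [] row
    if i < half then
      sq_altLoop half (i + 1) (q1 ++ [lr.1]) (q2 ++ [lr.2]) q3 q4 rows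
    else
      sq_altLoop half (i + 1) q1 q2 (q3 ++ [lr.1]) (q4 ++ [lr.2]) rows

def split_into_quarters_alt (matrix : List (List Int)) : List (List Int) × List (List Int) × List (List Int) × List (List Int) :=
  let half : Nat := matrix.length / 2
  sq_altLoop half 0 [] [] [] [] matrix

-- ===== PRECONDITION & SPEC =====
def Spec_split_into_quarters (matrix : List (List Int)) (out : List (List Int) × List (List Int) × List (List Int) × List (List Int)) : Prop := out = split_into_quarters_alt matrix
instance (matrix : List (List Int)) (out : List (List Int) × List (List Int) × List (List Int) × List (List Int)) : Decidable (Spec_split_into_quarters matrix out) := by unfold Spec_split_into_quarters; infer_instance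

-- ===== CLAIM =====
def Claim_equal_split_into_quarters : Prop := ∀ (matrix : List (List Int)), Dom_split_into_quarters matrix → Spec_split_into_quarters matrix (split_into_quarters matrix)

-- ===== LEMMAS AND PROOFS =====

lemma sq_rowLoop_eq (half : Nat) (row : List Int) :
    ∀ (j : Nat) (left right : List Int),
    sq_rowLoop half j left right row =
      (left ++ row.take (half - j), right ++ row.drop (half - j)) := by
  induction row with
  | nil => intro j l r; simp [sq_rowLoop]
  | cons x xs ih =>
    intro j l r
    by_cases h : j < half
    · have ht : half - j = (half - (j + 1)) + 1 := by omega
      simp [sq_rowLoop, h, ih, ht, List.append_assoc]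
    · have ht : half - j = 0 := by omega
      simp [sq_rowLoop, h, ih, ht, List.append_assoc, Nat.sub_add_eq]

lemma sq_altLoop_eq (half : Nat) (rows : List (List Int)) :
    ∀ (i : Nat) (q1 q2 q3 q4 : List (List Int)),
    sq_altLoop half i q1 q2 q3 q4 rows =
      (q1 ++ (rows.take (half - i)).map (fun row => row.take half),
       q2 ++ (rows.take (half - i)).map (fun row => row.drop half),
       q3 ++ (rows.drop (half - i)).map (fun row => row.take half),
       q4 ++ (rows.drop (half - i)).map (fun row => row.drop half)) := by
  induction rows with
  | nil => intro i q1 q2 q3 q4; simp [sq_altLoop]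
  | cons r rs ih =>
    intro i q1 q2 q3 q4
    by_cases h : i < half
    · have ht : half - i = (half - (i + 1)) + 1 := by omega
      simp [sq_altLoop, h, ih, ht, sq_rowLoop_eq, List.append_assoc]
    · have ht : half - i = 0 := by omega
      simp [sq_altLoop, h, ih, ht, sq_rowLoop_eq, List.append_assoc, Nat.sub_add_eq]

-- ===== VERDICT =====
theorem split_into_quarters_spec : Claim_equal_split_into_quarters := by
  intro matrix _
  show _ = _
  simp only [split_into_quarters, split_into_quarters_alt, sq_altLoop_eq,
    PySem.List.slice_to_natCast, PySem.List.slice_from_natCast, Nat.sub_zero, List.nil_append]
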